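-- pv_equiv track=rewrite | github.com/Crafterzilla/Secure_Texting | Super_Secure_Version/server_interclient_comms.py | godly_parser
-- ===== SOURCE A (Python) =====
-- from queue import LifoQueue
--
-- valid_chars = {chr(i) for i in range(65, 91)} | {chr(j) for j in range(97, 123)}
--
-- valid_message_chars = valid_chars |  {'.', '!', "'", "?", ",", "{", "}", ":", "\"", "_", "-", "+", "=", "/", "\\", "*", "&", "^", "%", "$", "#", "@", "!", "~", "`", "|", ";", "<", ">", "[", "]", "(", ")"}
--
-- def godly_parser(cmd: str) -> list[str]:
--     # Stack to check if quotations are closed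
--     stack = LifoQueue()
--     str_list = []
--
--     # Special case: if the command contains JSON (for encrypted messages)
--     if cmd.startswith("SEND ") and "{" in cmd and "}" in cmd:
--         # Find the TO part
--         to_index = cmd.rfind(" TO ")
--         if to_index > 0:
--             # Extract the message parts
--             send_part = "SEND"
--             encrypted_part = cmd[5:to_index].strip()
--             to_part = "TO"
--             recipient_part = cmd[to_index + 4:].strip()
--
--             return [send_part, encrypted_part, to_part, recipient_part]
--
--     # Regular parsing
--     tmp_str = ""
--     json_mode = False
--     brace_count = 0
--
--     for char in cmd:
--         # If entering JSON mode
--         if char == '{':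
--             if not json_mode and stack.empty():
--                 if tmp_str:
--                     str_list.append(tmp_str)
--                     tmp_str = ""
--                 json_mode = True
--                 brace_count = 1
--                 tmp_str += char
--                 continue
--             elif json_mode:
--                 brace_count += 1
--
--         # If exiting JSON mode
--         elif char == '}' and json_mode:
--             brace_count -= 1
--             tmp_str += char
--             if brace_count == 0:
--                 str_list.append(tmp_str)
--                 tmp_str = ""
--                 json_mode = False
--                 continue
--
--         # If in JSON mode, accept all characters
--         elif json_mode:
--             tmp_str += char
--             continue
--
--         # If char is invalid outside of JSON, raise an exception
--         elif char not in valid_chars and stack.empty():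
--             raise ValueError(f"Invalid character: '{char}'")
--         elif char not in valid_message_chars and not stack.empty():
--             raise ValueError(f"Invalid character in message: '{char}'")
--         # If char space, skip
--         elif char == ' ' and stack.empty():
--             if tmp_str != "":
--                 str_list.append(tmp_str)
--                 tmp_str = ""
--         elif char == '"':
--             # If stack empty fill stack, else
--             if stack.empty():
--                 stack.put(char)
--             else:
--                 stack.get()
--                 str_list.append(tmp_str)
--                 tmp_str = ""
--         else:
--             tmp_str += char
--
--     # If quotations are not closed, raise exception
--     if not stack.empty():
--         raise ValueError("Unclosed quotation mark")
--
--     # If JSON is not closed, raise exception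
--     if json_mode:
--         raise ValueError("Unclosed JSON object")
--
--     if tmp_str:  # Add the last part if it exists
--         str_list.append(tmp_str)
--
--     return str_list
-- ===== SOURCE B (Python) =====
-- # B: index-driven dispatcher (word scan / brace-segment scan) instead of A's flag-driven
-- # char-by-char state machine; keeps the whole brace-delimited substring verbatim (A drops
-- # nested '{' from the token -- see the stated intended difference).
-- def godly_parser(cmd: str) -> list[str]:
--     # Special case kept verbatim: SEND <json> TO <recipient>
--     if cmd.startswith("SEND ") and "{" in cmd and "}" in cmd:
--         to_index = cmd.rfind(" TO ")
--         if to_index > 0: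
--             return ["SEND", cmd[5:to_index].strip(), "TO",
--                     cmd[to_index + 4:].strip()]
--     tokens = []
--     i, n = 0, len(cmd)
--     while i < n:
--         c = cmd[i]
--         if c == '{':
--             # scan forward over the brace-delimited segment, counting depth
--             depth = 1
--             j = i + 1
--             while j < n and depth > 0:
--                 if cmd[j] == '{':
--                     depth += 1
--                 elif cmd[j] == '}':
--                     depth -= 1
--                 j += 1
--             if depth > 0:
--                 raise ValueError("Unclosed JSON object")
--             tokens.append(cmd[i:j])
--             i = j
--         elif c.isascii() and c.isalpha():
--             # scan forward over a bare word of ASCII letters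
--             j = i + 1
--             while j < n and cmd[j].isascii() and cmd[j].isalpha():
--                 j += 1
--             tokens.append(cmd[i:j])
--             i = j
--         else:
--             raise ValueError(f"Invalid character: '{c}'")
--     return tokens
-- ===== Notes on version B (the rewrite author's own statement) =====
-- stated objective: alternative
-- what changed: Replaces A's single flag-driven char-by-char state machine (json_mode/brace_count/stack flags threaded through one loop) by an index-driven outer dispatcher with dedicated inner scans: a word scan over ASCII letters and a depth-counting brace-segment scan that emits the whole brace-delimited slice; B keeps nested '{' inside a brace token where A drops them.
-- intended difference: On commands that A parses successfully and that contain a '{' nested inside a brace group (outside the SEND special case), A drops the inner '{' from the emitted token while still counting it for depth, returning a corrupted brace segment (e.g. 'a{b{c}d}e' -> ['a', '{bc}d}', 'e']); B returns the brace-delimited substring verbatim (['a', '{b{c}d}', 'e']), which is the intended token. — e.g. on godly_parser("a{b{c}d}e"): A returns ["a", "{bc}d}", "e"], B returns ["a", "{b{c}d}", "e"]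
import Mathlib
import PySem

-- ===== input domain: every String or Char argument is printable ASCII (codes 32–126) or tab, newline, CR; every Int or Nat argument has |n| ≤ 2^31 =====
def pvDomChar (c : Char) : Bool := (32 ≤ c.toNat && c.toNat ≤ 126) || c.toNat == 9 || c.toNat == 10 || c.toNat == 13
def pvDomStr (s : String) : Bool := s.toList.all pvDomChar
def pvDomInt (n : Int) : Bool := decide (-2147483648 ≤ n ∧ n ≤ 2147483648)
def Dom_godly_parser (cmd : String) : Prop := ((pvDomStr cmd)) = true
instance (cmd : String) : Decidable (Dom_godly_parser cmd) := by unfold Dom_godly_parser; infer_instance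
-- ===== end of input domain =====

-- B replaces A's flag-driven char-by-char state machine by an outer dispatcher with inner
-- segment scans, and keeps nested '{' inside a brace token (A drops them: stated difference).

-- ===== PORT A =====

-- valid_chars = ASCII letters
def pvValidChar (c : Char) : Bool := ('A' ≤ c && c ≤ 'Z') || ('a' ≤ c && c ≤ 'z')

-- valid_message_chars = valid_chars | punctuation set
def pvValidMsgChar (c : Char) : Bool :=
  pvValidChar c || (c ∈ ['.', '!', '\'', '?', ',', '{', '}', ':', '"', '_', '-', '+', '=',
    '/', '\\', '*', '&', '^', '%', '$', '#', '@', '~', '`', '|', ';', '<', '>', '[', ']', '(', ')'])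

-- the SEND/JSON special case at the top of A (identical code is kept verbatim in B)
def aSpecial? (cs : List Char) : Option (List (List Char)) :=
  if PySem.Chars.startswith cs ("SEND ".toList) && PySem.Chars.isIn ['{'] cs
      && PySem.Chars.isIn ['}'] cs then
    let toIndex : Int := PySem.Chars.rfind cs (" TO ".toList)
    if toIndex > 0 then
      some ["SEND".toList,
            PySem.Chars.strip (PySem.List.slice cs (some 5) (some toIndex)),
            "TO".toList,
            PySem.Chars.strip (PySem.List.slice cs (some (toIndex + 4)) none)]
    else none
  else none

-- A's loop state: (str_list, tmp_str, json_mode, brace_count, stack size)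
structure ASt where
  acc : List (List Char)
  tmp : List Char
  jm : Bool
  bc : Int
  sn : Nat
deriving DecidableEq, Repr

-- one iteration of A's for loop, branches in A's order; none = raise ValueError
def aStep (c : Char) (st : ASt) : Option ASt :=
  if c = '{' then
    (if !st.jm && st.sn = 0 then
      some ⟨(if st.tmp ≠ [] then st.acc ++ [st.tmp] else st.acc), ['{'], true, 1, st.sn⟩
    else if st.jm then some ⟨st.acc, st.tmp, st.jm, st.bc + 1, st.sn⟩
    else some st)
  else if c = '}' && st.jm then
    (if st.bc - 1 = 0 then some ⟨st.acc ++ [st.tmp ++ [c]], [], false, 0, st.sn⟩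
     else some ⟨st.acc, st.tmp ++ [c], st.jm, st.bc - 1, st.sn⟩)
  else if st.jm then some ⟨st.acc, st.tmp ++ [c], st.jm, st.bc, st.sn⟩
  else if !pvValidChar c && st.sn = 0 then none
  else if !pvValidMsgChar c && st.sn ≠ 0 then none
  else if c = ' ' && st.sn = 0 then
    (if st.tmp ≠ [] then some ⟨st.acc ++ [st.tmp], [], st.jm, st.bc, st.sn⟩ else some st)
  else if c = '"' then
    (if st.sn = 0 then some ⟨st.acc, st.tmp, st.jm, st.bc, st.sn + 1⟩
     else some ⟨st.acc ++ [st.tmp], [], st.jm, st.bc, st.sn - 1⟩)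
  else some ⟨st.acc, st.tmp ++ [c], st.jm, st.bc, st.sn⟩

def aRun : List Char → ASt → Option ASt
  | [], st => some st
  | c :: cs, st =>
    match aStep c st with
    | none => none
    | some st' => aRun cs st'

-- the two closedness checks and final flush after the loop
def aFinish (st : ASt) : Option (List (List Char)) :=
  if st.sn ≠ 0 then none
  else if st.jm then none
  else some (if st.tmp ≠ [] then st.acc ++ [st.tmp] else st.acc)

def godly_parser (cmd : String) : List String :=
  match aSpecial? cmd.toList with
  | some r => r.map String.ofList
  | none =>
    match (aRun cmd.toList ⟨[], [], false, 0, 0⟩).bind aFinish with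
    | some l => l.map String.ofList
    | none => []              -- A raises ValueError here

-- ===== PORT B =====

-- identical special-case code, B's own copy
def bSpecial? (cs : List Char) : Option (List (List Char)) :=
  if PySem.Chars.startswith cs ("SEND ".toList) && PySem.Chars.isIn ['{'] cs
      && PySem.Chars.isIn ['}'] cs then
    let toIndex : Int := PySem.Chars.rfind cs (" TO ".toList)
    if toIndex > 0 then
      some ["SEND".toList,
            PySem.Chars.strip (PySem.List.slice cs (some 5) (some toIndex)),
            "TO".toList,
            PySem.Chars.strip (PySem.List.slice cs (some (toIndex + 4)) none)]
    else none
  else none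

-- B's inner brace-segment scan (the j/depth while loop): returns the segment including
-- both braces and the rest of the input; none = unclosed JSON object
def bJson : List Char → Nat → List Char → Option (List Char × List Char)
  | [], _, _ => none
  | c :: rest, d, seg =>
    if c = '{' then bJson rest (d + 1) (seg ++ [c])
    else if c = '}' then
      (if d = 1 then some (seg ++ [c], rest) else bJson rest (d - 1) (seg ++ [c]))
    else bJson rest d (seg ++ [c])

-- c.isascii() and c.isalpha() — exact on ASCII input
def bIsWordChar (c : Char) : Bool := ('A' ≤ c && c ≤ 'Z') || ('a' ≤ c && c ≤ 'z')

-- B's outer dispatcher (the while loop over i); the fuel argument only makes the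
-- recursion structural (each step consumes at least one character, so length+1 suffices
-- and the 0 case is never reached); none = raise ValueError
def bLoop : Nat → List Char → Option (List (List Char))
  | 0, _ => none
  | _ + 1, [] => some []
  | fuel + 1, c :: rest =>
    if c = '{' then
      match bJson rest 1 [c] with
      | some (seg, rest') => (bLoop fuel rest').map (seg :: ·)
      | none => none
    else if bIsWordChar c then
      (bLoop fuel (rest.dropWhile bIsWordChar)).map ((c :: rest.takeWhile bIsWordChar) :: ·)
    else none

def godly_parser_alt (cmd : String) : List String :=
  match bSpecial? cmd.toList with
  | some r => r.map String.ofList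
  | none =>
    match bLoop (cmd.toList.length + 1) cmd.toList with
    | some l => l.map String.ofList
    | none => []              -- B raises ValueError here

-- ===== PRECONDITION & SPEC =====

-- ASCII letter (codes 65-90, 97-122), stated independently of the ports
def pvLetter (c : Char) : Bool :=
  (65 ≤ c.toNat && c.toNat ≤ 90) || (97 ≤ c.toNat && c.toNat ≤ 122)

-- the SEND/JSON special-case tests of A's first lines, as conditions on the input:
-- starts with "SEND ", contains '{' and '}', and " TO " occurs at some positive index
def pvSpecialCase (cs : List Char) : Bool :=
  decide (cs.take 5 = "SEND ".toList) && cs.contains '{' && cs.contains '}'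
    && decide (" TO ".toList <:+: cs.drop 1)

-- regular parse succeeds iff every '}' closes an open '{', braces are balanced at the
-- end, and outside braces only ASCII letters (or '{') occur — space, '"' and all
-- punctuation are not in valid_chars, so A raises ValueError on them at top level
def pvScanOk : List Char → Nat → Bool
  | [], d => d = 0
  | c :: r, d =>
    if c = '{' then pvScanOk r (d + 1)
    else if c = '}' then (if d = 0 then false else pvScanOk r (d - 1))
    else if 0 < d then pvScanOk r d
    else pvLetter c && pvScanOk r 0

-- some '{' occurs nested inside a brace group
def pvNested : List Char → Nat → Bool
  | [], _ => false
  | c :: r, d =>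
    if c = '{' then (decide (0 < d)) || pvNested r (d + 1)
    else if c = '}' then pvNested r (d - 1)
    else pvNested r d

-- Pre_ excludes exactly the inputs on which A raises ValueError (an invalid character
-- outside braces, an unmatched '}' or an unclosed '{', outside the SEND special case)
def Pre_godly_parser (cmd : String) : Prop :=
  pvSpecialCase cmd.toList = true ∨ pvScanOk cmd.toList 0 = true
instance (cmd : String) : Decidable (Pre_godly_parser cmd) := by
  unfold Pre_godly_parser; infer_instance

def pvWitness_godly_parser : String := "hello"

-- On commands A parses successfully that contain a '{' nested inside a brace group
-- (outside the SEND special case), A drops the inner '{' from the emitted token while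
-- still counting it for depth, returning a corrupted brace segment; B returns the
-- brace-delimited substring verbatim, which is the intended token.
def D_godly_parser (cmd : String) : Prop :=
  pvSpecialCase cmd.toList = false ∧ pvScanOk cmd.toList 0 = true ∧
    pvNested cmd.toList 0 = true
instance (cmd : String) : Decidable (D_godly_parser cmd) := by
  unfold D_godly_parser; infer_instance

def Spec_godly_parser (cmd : String) (out : List String) : Prop :=
  ¬ D_godly_parser cmd → out = godly_parser_alt cmd
instance (cmd : String) (out : List String) : Decidable (Spec_godly_parser cmd out) := by
  unfold Spec_godly_parser; infer_instance

def pvDiffWitness_godly_parser : String := "a{b{c}d}e"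
def pvDiffWitnessOut_godly_parser : (List String) × (List String) :=
  (["a", "{bc}d}", "e"], ["a", "{b{c}d}", "e"])

-- ===== CLAIM (what is proved, stated in full; the proofs are below) =====
def Claim_unchanged_godly_parser : Prop :=
  ∀ (cmd : String), Dom_godly_parser cmd → Pre_godly_parser cmd →
    Spec_godly_parser cmd (godly_parser cmd)
def Claim_changed_godly_parser : Prop :=
  Dom_godly_parser (pvDiffWitness_godly_parser) ∧ Pre_godly_parser (pvDiffWitness_godly_parser) ∧
  D_godly_parser (pvDiffWitness_godly_parser) ∧
  godly_parser (pvDiffWitness_godly_parser) = pvDiffWitnessOut_godly_parser.1 ∧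
  godly_parser_alt (pvDiffWitness_godly_parser) = pvDiffWitnessOut_godly_parser.2 ∧
  pvDiffWitnessOut_godly_parser.1 ≠ pvDiffWitnessOut_godly_parser.2
def Claim_exact_godly_parser : Prop :=
  ∀ (cmd : String), Dom_godly_parser cmd → Pre_godly_parser cmd → D_godly_parser cmd →
    godly_parser cmd ≠ godly_parser_alt cmd

-- ===== LEMMAS AND PROOFS =====

theorem special_eq (cs : List Char) : bSpecial? cs = aSpecial? cs := rfl

theorem pvLetter_eq : ∀ c, pvLetter c = pvValidChar c := by
  intro c
  simp only [pvLetter, pvValidChar, Char.le_def, Char.toNat]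
  rcases c with ⟨v, h⟩
  simp [UInt32.le_iff_toNat_le]
  rfl

theorem rfind_go_pos (cs sub : List Char) (j : Nat) (hj : 0 < j)
    (hpre : sub.isPrefixOf (cs.drop j) = true) :
    ∀ k, j ≤ k → 0 < PySem.Chars.rfind.go cs sub k := by
  intro k
  induction k with
  | zero => intro h; omega
  | succ k ih =>
    intro hk
    show 0 < PySem.Chars.rfind.go cs sub (k + 1)
    unfold PySem.Chars.rfind.go
    by_cases hp : sub.isPrefixOf (List.drop (k + 1) cs) = true
    · simp [hp]
    · simp only [hp]
      rcases Nat.lt_or_ge j (k + 1) with hlt | hge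
      · exact ih (by omega)
      · have : j = k + 1 := by omega
        subst this
        exact absurd hpre hp

theorem special_some (cs : List Char) (h : pvSpecialCase cs = true) : aSpecial? cs ≠ none := by
  unfold pvSpecialCase at h
  simp only [Bool.and_eq_true, decide_eq_true_eq, List.contains_iff_mem] at h
  obtain ⟨⟨⟨h1, h2⟩, h3⟩, h4⟩ := h
  have hsw : PySem.Chars.startswith cs ("SEND ".toList) = true := by
    rw [PySem.Chars.startswith_iff]
    exact List.prefix_iff_eq_take.mpr (by rw [show ("SEND ".toList).length = 5 from rfl, h1])
  have hin1 : PySem.Chars.isIn ['{'] cs = true := by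
    rw [PySem.Chars.isIn_iff_infix]
    exact (List.singleton_infix_iff _ _).mpr h2
  have hin2 : PySem.Chars.isIn ['}'] cs = true := by
    rw [PySem.Chars.isIn_iff_infix]
    exact (List.singleton_infix_iff _ _).mpr h3
  have hrf : PySem.Chars.rfind cs (" TO ".toList) > 0 := by
    obtain ⟨pre, suf, hps⟩ := h4
    have hdrop : " TO ".toList <+: cs.drop (pre.length + 1) := by
      have hthis : (cs.drop 1).drop pre.length = " TO ".toList ++ suf := by
        rw [← hps]; simp
      rw [List.drop_drop, Nat.add_comm] at hthis
      exact ⟨suf, hthis.symm⟩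
    have hpre : (" TO ".toList).isPrefixOf (cs.drop (pre.length + 1)) = true :=
      List.isPrefixOf_iff_prefix.mpr hdrop
    have hlen : pre.length + 1 ≤ cs.length := by
      have hle := List.IsPrefix.length_le hdrop
      simp only [List.length_drop] at hle
      have : (" TO ".toList).length = 4 := rfl
      omega
    unfold PySem.Chars.rfind
    exact rfind_go_pos cs (" TO ".toList) (pre.length + 1) (by omega) hpre cs.length hlen
  unfold aSpecial?
  rw [if_pos (by rw [hsw, hin1, hin2]; rfl)]
  exact fun hnone => by rw [if_pos hrf] at hnone; simp at hnone

theorem rfind_go_pos_rev (cs sub : List Char) :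
    ∀ k, 0 < PySem.Chars.rfind.go cs sub k →
      ∃ j, 0 < j ∧ sub.isPrefixOf (cs.drop j) = true := by
  intro k
  induction k with
  | zero =>
    intro h
    unfold PySem.Chars.rfind.go at h
    by_cases hp : sub.isPrefixOf cs = true <;> simp [hp] at h
  | succ k ih =>
    intro h
    unfold PySem.Chars.rfind.go at h
    by_cases hp : sub.isPrefixOf (List.drop (k + 1) cs) = true
    · exact ⟨k + 1, by omega, hp⟩
    · simp only [hp, Bool.false_eq_true, if_false] at h
      exact ih h

theorem special_none (cs : List Char) (h : pvSpecialCase cs = false) : aSpecial? cs = none := by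
  by_cases hne : aSpecial? cs = none
  · exact hne
  · exfalso
    unfold aSpecial? at hne
    by_cases h1 : (PySem.Chars.startswith cs ("SEND ".toList) && PySem.Chars.isIn ['{'] cs
        && PySem.Chars.isIn ['}'] cs) = true
    · rw [if_pos h1] at hne
      by_cases h2 : PySem.Chars.rfind cs (" TO ".toList) > 0
      · -- all of A's tests hold: contradict h by showing pvSpecialCase = true
        simp only [Bool.and_eq_true] at h1
        obtain ⟨⟨hsw, hin1⟩, hin2⟩ := h1
        have ht5 : cs.take 5 = "SEND ".toList := by
          have hp := (PySem.Chars.startswith_iff (s := cs) (p := "SEND ".toList)).mp hsw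
          have h5 := List.prefix_iff_eq_take.mp hp
          rw [show ("SEND ".toList).length = 5 from rfl] at h5
          exact h5.symm
        have hm1 : '{' ∈ cs := by
          rw [PySem.Chars.isIn_iff_infix] at hin1
          exact (List.singleton_infix_iff _ _).mp hin1
        have hm2 : '}' ∈ cs := by
          rw [PySem.Chars.isIn_iff_infix] at hin2
          exact (List.singleton_infix_iff _ _).mp hin2
        have hto : " TO ".toList <:+: cs.drop 1 := by
          unfold PySem.Chars.rfind at h2
          obtain ⟨j, hj, hpre⟩ := rfind_go_pos_rev cs (" TO ".toList) cs.length h2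
          obtain ⟨t, ht⟩ := List.isPrefixOf_iff_prefix.mp hpre
          refine ⟨(cs.drop 1).take (j - 1), t, ?_⟩
          have hdd : (cs.drop 1).drop (j - 1) = cs.drop j := by
            rw [List.drop_drop]; congr 1; omega
          rw [List.append_assoc, ht, ← hdd, List.take_append_drop]
        have hto' : [' ', 'T', 'O', ' '] <:+: cs.tail := by simpa using hto
        rw [show pvSpecialCase cs = true by
          unfold pvSpecialCase
          simp [ht5, hm1, hm2, hto']] at h
        exact Bool.noConfusion h
      · simp at hne
        exact h2 (by simpa using hne)
    · rw [if_neg h1] at hne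
      exact hne rfl

theorem dropWhile_head_false {α : Type} (p : α → Bool) :
    ∀ (l : List α) (x : α) (r : List α), l.dropWhile p = x :: r → p x = false := by
  intro l
  induction l with
  | nil => intro x r h; simp [List.dropWhile] at h
  | cons a t ih =>
    intro x r h
    rw [List.dropWhile_cons] at h
    by_cases ha : p a = true
    · rw [if_pos ha] at h; exact ih x r h
    · rw [if_neg ha] at h
      obtain ⟨rfl, -⟩ := List.cons.inj h
      simpa using ha

theorem validChar_ne (c : Char) (h : pvValidChar c = true) :
    c ≠ '{' ∧ c ≠ '}' ∧ c ≠ ' ' ∧ c ≠ '"' := by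
  refine ⟨?_, ?_, ?_, ?_⟩ <;> (rintro rfl; revert h; decide)

-- A's loop over a run of letters at top level just extends tmp_str
theorem aRun_word (ws : List Char) (hws : ∀ c ∈ ws, pvValidChar c = true) :
    ∀ (rest : List Char) (acc : List (List Char)) (tmp : List Char),
    aRun (ws ++ rest) ⟨acc, tmp, false, 0, 0⟩ = aRun rest ⟨acc, tmp ++ ws, false, 0, 0⟩ := by
  induction ws with
  | nil => intro rest acc tmp; simp
  | cons c t ih =>
    intro rest acc tmp
    have hc : pvValidChar c = true := hws c (by simp)
    obtain ⟨h1, h2, h3, h4⟩ := validChar_ne c hc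
    have : aStep c ⟨acc, tmp, false, 0, 0⟩ = some ⟨acc, tmp ++ [c], false, 0, 0⟩ := by
      simp [aStep, h1, h2, h3, h4, hc]
    simp only [List.cons_append, aRun, this]
    rw [ih (fun c hc => hws c (by simp [hc])) rest acc (tmp ++ [c])]
    simp

-- A's loop over a flat brace segment: appends the chars and emits on the closing '}'
theorem aRun_json (xs : List Char) (hxs : ∀ c ∈ xs, c ≠ '{' ∧ c ≠ '}') :
    ∀ (rest : List Char) (acc : List (List Char)) (seg : List Char),
    aRun (xs ++ '}' :: rest) ⟨acc, seg, true, 1, 0⟩ =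
      aRun rest ⟨acc ++ [seg ++ (xs ++ ['}'])], [], false, 0, 0⟩ := by
  induction xs with
  | nil =>
    intro rest acc seg
    have : aStep '}' ⟨acc, seg, true, 1, 0⟩ = some ⟨acc ++ [seg ++ ['}']], [], false, 0, 0⟩ := by
      simp [aStep]
    simp only [List.nil_append, aRun, this]
  | cons c t ih =>
    intro rest acc seg
    obtain ⟨h1, h2⟩ := hxs c (by simp)
    have : aStep c ⟨acc, seg, true, 1, 0⟩ = some ⟨acc, seg ++ [c], true, 1, 0⟩ := by
      simp [aStep, h1, h2]
    simp only [List.cons_append, aRun, this]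
    rw [ih (fun c hc => hxs c (by simp [hc])) rest acc (seg ++ [c])]
    simp

-- B's segment scan over a flat brace segment
theorem bJson_flat (xs : List Char) (hxs : ∀ c ∈ xs, c ≠ '{' ∧ c ≠ '}') :
    ∀ (rest seg : List Char),
    bJson (xs ++ '}' :: rest) 1 seg = some (seg ++ (xs ++ ['}']), rest) := by
  induction xs with
  | nil => intro rest seg; simp [bJson]
  | cons c t ih =>
    intro rest seg
    obtain ⟨h1, h2⟩ := hxs c (by simp)
    simp only [List.cons_append, bJson, h1, h2, if_false]
    rw [ih (fun c hc => hxs c (by simp [hc])) rest (seg ++ [c])]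
    simp

-- a valid, nesting-free continuation at depth 1 is a flat segment then a top-level rest
theorem seg_split : ∀ (cs : List Char), pvScanOk cs 1 = true → pvNested cs 1 = false →
    ∃ xs rest, cs = xs ++ '}' :: rest ∧ (∀ c ∈ xs, c ≠ '{' ∧ c ≠ '}') ∧
      pvScanOk rest 0 = true ∧ pvNested rest 0 = false := by
  intro cs
  induction cs with
  | nil => intro h _; simp [pvScanOk] at h
  | cons c r ih =>
    intro hok hne
    by_cases h1 : c = '{'
    · subst h1; simp [pvNested] at hne
    · by_cases h2 : c = '}'
      · subst h2
        refine ⟨[], r, by simp, by simp, ?_, ?_⟩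
        · simpa [pvScanOk] using hok
        · simpa [pvNested] using hne
      · have hok' : pvScanOk r 1 = true := by simpa [pvScanOk, h1, h2] using hok
        have hne' : pvNested r 1 = false := by simpa [pvNested, h1, h2] using hne
        obtain ⟨xs, rest, hcs, hflat, hrok, hrne⟩ := ih hok' hne'
        refine ⟨c :: xs, rest, by simp [hcs], ?_, hrok, hrne⟩
        intro d hd
        rw [List.mem_cons] at hd
        rcases hd with rfl | hd
        · exact ⟨h1, h2⟩
        · exact hflat d hd

-- letters at top level do not change pvScanOk / pvNested state
theorem scanOk_letters (ws : List Char) (hws : ∀ c ∈ ws, pvValidChar c = true) :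
    ∀ rest, pvScanOk (ws ++ rest) 0 = true → pvScanOk rest 0 = true := by
  induction ws with
  | nil => simp
  | cons c t ih =>
    intro rest h
    have hc := hws c (by simp)
    obtain ⟨h1, h2, _, _⟩ := validChar_ne c hc
    apply ih (fun c hc => hws c (by simp [hc]))
    simpa [pvScanOk, pvLetter_eq, h1, h2, hc] using h

theorem nested_letters (ws : List Char) (hws : ∀ c ∈ ws, pvValidChar c = true) :
    ∀ rest, pvNested (ws ++ rest) 0 = pvNested rest 0 := by
  induction ws with
  | nil => simp
  | cons c t ih =>
    intro rest
    have hc := hws c (by simp)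
    obtain ⟨h1, h2, _, _⟩ := validChar_ne c hc
    rw [List.cons_append, show pvNested (c :: (t ++ rest)) 0 = pvNested (t ++ rest) 0 by
      simp [pvNested, h1, h2]]
    exact ih (fun c hc => hws c (by simp [hc])) rest

theorem bLoop_nil (fuel : Nat) (h : 0 < fuel) : bLoop fuel [] = some [] := by
  cases fuel with
  | zero => omega
  | succ f => rfl

-- the main equivalence of the two regular parses, on valid nesting-free input
theorem main_eq : ∀ (fuel : Nat) (cs : List Char), cs.length < fuel →
    pvScanOk cs 0 = true → pvNested cs 0 = false →
    ∀ acc, (aRun cs ⟨acc, [], false, 0, 0⟩).bind aFinish = (bLoop fuel cs).map (acc ++ ·) := by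
  intro fuel
  induction fuel with
  | zero => intro cs h; omega
  | succ f ih =>
    intro cs hlen hok hne acc
    match cs with
    | [] =>
      simp [aRun, aFinish, bLoop]
    | c :: r =>
      by_cases hbrace : c = '{'
      · subst hbrace
        have hok' : pvScanOk r 1 = true := by simpa [pvScanOk] using hok
        have hne' : pvNested r 1 = false := by simpa [pvNested] using hne
        obtain ⟨xs, rest, hr, hflat, hrok, hrne⟩ := seg_split r hok' hne'
        have hstep : aStep '{' (⟨acc, [], false, 0, 0⟩ : ASt) =
            some ⟨acc, ['{'], true, 1, 0⟩ := by simp [aStep]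
        have hlen' : rest.length < f := by
          subst hr; simp [List.length_append] at hlen ⊢; omega
        calc (aRun ('{' :: r) ⟨acc, [], false, 0, 0⟩).bind aFinish
            = (aRun rest ⟨acc ++ [('{' :: (xs ++ ['}']))], [], false, 0, 0⟩).bind aFinish := by
              rw [show aRun ('{' :: r) ⟨acc, [], false, 0, 0⟩
                    = aRun r ⟨acc, ['{'], true, 1, 0⟩ by simp [aRun, hstep]]
              rw [hr, aRun_json xs hflat rest acc ['{']]
              simp
          _ = (bLoop f rest).map ((acc ++ [('{' :: (xs ++ ['}']))]) ++ ·) :=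
              ih rest hlen' hrok hrne _
          _ = (bLoop (f + 1) ('{' :: r)).map (acc ++ ·) := by
              rw [show bLoop (f + 1) ('{' :: r)
                    = (bLoop f rest).map (('{' :: (xs ++ ['}'])) :: ·) by
                  simp only [bLoop]
                  rw [hr, bJson_flat xs hflat rest ['{']]
                  simp]
              cases bLoop f rest <;> simp
      · -- c is not '{'; by pvScanOk it must be a letter
        have hnotr : c ≠ '}' := by
          rintro rfl; simp [pvScanOk] at hok
        have hc : pvValidChar c = true := by
          by_contra hcc
          simp [pvScanOk, pvLetter_eq, hbrace, hnotr, hcc] at hok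
        have hcw : bIsWordChar = pvValidChar := rfl
        have hsplit : c :: r = (c :: r.takeWhile pvValidChar) ++ r.dropWhile pvValidChar := by
          simp [List.takeWhile_append_dropWhile]
        have hws_all : ∀ d ∈ c :: r.takeWhile pvValidChar, pvValidChar d = true := by
          intro d hd
          rw [List.mem_cons] at hd
          rcases hd with rfl | hd
          · exact hc
          · exact List.mem_takeWhile_imp hd
        have hword : aRun (c :: r) ⟨acc, [], false, 0, 0⟩ =
            aRun (r.dropWhile pvValidChar)
              ⟨acc, c :: r.takeWhile pvValidChar, false, 0, 0⟩ := by
          rw [hsplit, aRun_word _ hws_all]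
          simp
        have hbB : bLoop (f + 1) (c :: r) =
            (bLoop f (r.dropWhile pvValidChar)).map ((c :: r.takeWhile pvValidChar) :: ·) := by
          simp only [bLoop]
          rw [if_neg hbrace, hcw, if_pos hc]
        have hokr : pvScanOk (r.dropWhile pvValidChar) 0 = true :=
          scanOk_letters _ hws_all _ (by rw [← hsplit]; exact hok)
        have hner : pvNested (r.dropWhile pvValidChar) 0 = false := by
          rw [← nested_letters _ hws_all (r.dropWhile pvValidChar), ← hsplit]
          exact hne
        have hlen2 : (r.dropWhile pvValidChar).length < f := by
          have := List.length_dropWhile_le (p := pvValidChar) r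
          simp at hlen; omega
        cases hr2 : r.dropWhile pvValidChar with
        | nil =>
          rw [hr2] at hword
          rw [hword, hbB, hr2, bLoop_nil f (by rw [hr2] at hlen2; omega)]
          simp [aRun, aFinish]
        | cons x r2 =>
          rw [hr2] at hword hokr hner hlen2 hbB
          have hx : pvValidChar x = false := dropWhile_head_false pvValidChar r x r2 hr2
          have hxbrace : x = '{' := by
            by_contra hxx
            have hxr : x ≠ '}' := by
              rintro rfl
              simp [pvScanOk] at hokr
            simp [pvScanOk, pvLetter_eq, hxx, hxr, hx] at hokr
          subst hxbrace
          have hstep1 : aStep '{' (⟨acc, c :: r.takeWhile pvValidChar, false, 0, 0⟩ : ASt) =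
              some ⟨acc ++ [c :: r.takeWhile pvValidChar], ['{'], true, 1, 0⟩ := by
            simp [aStep]
          have hstep2 : aStep '{' (⟨acc ++ [c :: r.takeWhile pvValidChar], [], false, 0, 0⟩ : ASt) =
              some ⟨acc ++ [c :: r.takeWhile pvValidChar], ['{'], true, 1, 0⟩ := by
            simp [aStep]
          have hsame : aRun ('{' :: r2) ⟨acc, c :: r.takeWhile pvValidChar, false, 0, 0⟩ =
              aRun ('{' :: r2) ⟨acc ++ [c :: r.takeWhile pvValidChar], [], false, 0, 0⟩ := by
            simp [aRun, hstep1, hstep2]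
          rw [hword, hsame,
            ih ('{' :: r2) hlen2 hokr hner (acc ++ [c :: r.takeWhile pvValidChar]), hbB]
          cases bLoop f ('{' :: r2) <;> simp

-- what A makes of one of B's tokens: A drops every '{' after the opening one
def pvDropA : List Char → List Char
  | [] => []
  | c :: ts => if c = '{' then c :: ts.filter (· != '{') else c :: ts

-- joint characterization of a brace segment at depth d, nesting allowed:
-- B consumes the chunk verbatim, A consumes it dropping the inner '{'
theorem jseg : ∀ (cs : List Char) (d : Nat), 0 < d → pvScanOk cs d = true →
    ∃ body rest',
      cs = body ++ rest' ∧ body ≠ [] ∧ pvScanOk rest' 0 = true ∧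
      pvNested cs d = (body.contains '{' || pvNested rest' 0) ∧
      (∀ segB, bJson cs d segB = some (segB ++ body, rest')) ∧
      (∀ (acc : List (List Char)) (tmpA : List Char),
        aRun cs ⟨acc, tmpA, true, (d : Int), 0⟩ =
          aRun rest' ⟨acc ++ [tmpA ++ body.filter (· != '{')], [], false, 0, 0⟩) := by
  intro cs
  induction cs with
  | nil => intro d hd hok; simp [pvScanOk] at hok; omega
  | cons c r ih =>
    intro d hd hok
    by_cases hc1 : c = '{'
    · subst hc1
      have hok' : pvScanOk r (d + 1) = true := by simpa [pvScanOk] using hok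
      obtain ⟨body, rest', hcs, hbne, hok0, hnst, hbj, har⟩ := ih (d + 1) (by omega) hok'
      refine ⟨'{' :: body, rest', by simp [hcs], by simp, hok0, ?_, ?_, ?_⟩
      · simp [pvNested, hd]
      · intro segB
        simp [bJson, hbj (segB ++ ['{'])]
      · intro acc tmpA
        have hstep : aStep '{' (⟨acc, tmpA, true, (d : Int), 0⟩ : ASt) =
            some ⟨acc, tmpA, true, (d : Int) + 1, 0⟩ := by simp [aStep]
        have hcast : (d : Int) + 1 = ((d + 1 : Nat) : Int) := by push_cast; ring
        rw [show aRun ('{' :: r) ⟨acc, tmpA, true, (d : Int), 0⟩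
              = aRun r ⟨acc, tmpA, true, (d : Int) + 1, 0⟩ by simp [aRun, hstep],
          hcast, har acc tmpA]
        simp [List.filter]
    · by_cases hc2 : c = '}'
      · subst hc2
        have hok' : pvScanOk r (d - 1) = true := by
          have hd0 : d ≠ 0 := by omega
          simpa [pvScanOk, hd0] using hok
        by_cases hd1 : d = 1
        · subst hd1
          refine ⟨['}'], r, by simp, by simp, by simpa using hok', ?_, ?_, ?_⟩
          · simp [pvNested]
          · intro segB; simp [bJson]
          · intro acc tmpA
            have hstep : aStep '}' (⟨acc, tmpA, true, (1 : Int), 0⟩ : ASt) =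
                some ⟨acc ++ [tmpA ++ ['}']], [], false, 0, 0⟩ := by simp [aStep]
            simp only [Nat.cast_one]
            rw [show aRun ('}' :: r) ⟨acc, tmpA, true, (1 : Int), 0⟩
                  = aRun r ⟨acc ++ [tmpA ++ ['}']], [], false, 0, 0⟩ by simp [aRun, hstep]]
            simp [List.filter]
        · obtain ⟨body, rest', hcs, hbne, hok0, hnst, hbj, har⟩ :=
            ih (d - 1) (by omega) hok'
          refine ⟨'}' :: body, rest', by simp [hcs], by simp, hok0, ?_, ?_, ?_⟩
          · simpa [pvNested] using hnst
          · intro segB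
            simp [bJson, hd1, hbj (segB ++ ['}'])]
          · intro acc tmpA
            have hbc : ((d : Int) - 1) ≠ 0 := by omega
            have hstep : aStep '}' (⟨acc, tmpA, true, (d : Int), 0⟩ : ASt) =
                some ⟨acc, tmpA ++ ['}'], true, (d : Int) - 1, 0⟩ := by
              simp [aStep, hbc]
            have hcast : (d : Int) - 1 = ((d - 1 : Nat) : Int) := by
              push_cast [Nat.cast_sub (by omega : 1 ≤ d)]; ring
            rw [show aRun ('}' :: r) ⟨acc, tmpA, true, (d : Int), 0⟩
                  = aRun r ⟨acc, tmpA ++ ['}'], true, (d : Int) - 1, 0⟩ by simp [aRun, hstep],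
              hcast, har acc (tmpA ++ ['}'])]
            simp [List.filter]
      · have hok' : pvScanOk r d = true := by simpa [pvScanOk, hc1, hc2, hd] using hok
        obtain ⟨body, rest', hcs, hbne, hok0, hnst, hbj, har⟩ := ih d hd hok'
        have hc1' : ¬ '{' = c := fun h => hc1 h.symm
        refine ⟨c :: body, rest', by simp [hcs], by simp, hok0, ?_, ?_, ?_⟩
        · simpa [pvNested, hc1, hc2, hc1'] using hnst
        · intro segB
          simp [bJson, hc1, hc2, hbj (segB ++ [c])]
        · intro acc tmpA
          have hstep : aStep c (⟨acc, tmpA, true, (d : Int), 0⟩ : ASt) =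
              some ⟨acc, tmpA ++ [c], true, (d : Int), 0⟩ := by
            simp [aStep, hc1, hc2]
          have hfc : List.filter (fun x => x != '{') (c :: body) =
              c :: List.filter (fun x => x != '{') body := by
            simp [hc1]
          rw [show aRun (c :: r) ⟨acc, tmpA, true, (d : Int), 0⟩
                = aRun r ⟨acc, tmpA ++ [c], true, (d : Int), 0⟩ by simp [aRun, hstep],
            har acc (tmpA ++ [c]), hfc]
          simp

-- generalized equivalence: on every valid input A's output is B's output with the
-- inner '{' dropped from each token
theorem main_gen : ∀ (fuel : Nat) (cs : List Char), cs.length < fuel →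
    pvScanOk cs 0 = true → ∀ acc,
    (aRun cs ⟨acc, [], false, 0, 0⟩).bind aFinish =
      (bLoop fuel cs).map (fun lb => acc ++ lb.map pvDropA) := by
  intro fuel
  induction fuel with
  | zero => intro cs h; omega
  | succ f ih =>
    intro cs hlen hok acc
    match cs with
    | [] => simp [aRun, aFinish, bLoop]
    | c :: r =>
      by_cases hbrace : c = '{'
      · subst hbrace
        have hok' : pvScanOk r 1 = true := by simpa [pvScanOk] using hok
        obtain ⟨body, rest', hr, hbne, hok0, _, hbj, har⟩ := jseg r 1 (by omega) hok'
        have hstep : aStep '{' (⟨acc, [], false, 0, 0⟩ : ASt) =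
            some ⟨acc, ['{'], true, 1, 0⟩ := by simp [aStep]
        have hlen' : rest'.length < f := by
          have h1 : r.length = body.length + rest'.length := by rw [hr]; simp
          have h2 : 1 ≤ body.length := by
            cases body with
            | nil => exact absurd rfl hbne
            | cons _ _ => simp
          simp at hlen; omega
        have harun : aRun ('{' :: r) ⟨acc, [], false, 0, 0⟩ =
            aRun rest' ⟨acc ++ [('{' :: body.filter (· != '{'))], [], false, 0, 0⟩ := by
          rw [show aRun ('{' :: r) ⟨acc, [], false, 0, 0⟩
                = aRun r ⟨acc, ['{'], true, (1 : Int), 0⟩ by simp [aRun, hstep]]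
          rw [show ((1 : Int)) = ((1 : Nat) : Int) by simp]
          rw [har acc ['{']]
          rfl
        rw [harun, ih rest' hlen' hok0 (acc ++ [('{' :: body.filter (· != '{'))])]
        rw [show bLoop (f + 1) ('{' :: r) = (bLoop f rest').map (('{' :: body) :: ·) by
          simp [bLoop, hbj ['{']]]
        cases bLoop f rest' <;> simp [pvDropA]
      · have hnotr : c ≠ '}' := by
          rintro rfl; simp [pvScanOk] at hok
        have hc : pvValidChar c = true := by
          by_contra hcc
          simp [pvScanOk, pvLetter_eq, hbrace, hnotr, hcc] at hok
        have hcw : bIsWordChar = pvValidChar := rfl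
        have hsplit : c :: r = (c :: r.takeWhile pvValidChar) ++ r.dropWhile pvValidChar := by
          simp [List.takeWhile_append_dropWhile]
        have hws_all : ∀ d ∈ c :: r.takeWhile pvValidChar, pvValidChar d = true := by
          intro d hd
          rw [List.mem_cons] at hd
          rcases hd with rfl | hd
          · exact hc
          · exact List.mem_takeWhile_imp hd
        have hword : aRun (c :: r) ⟨acc, [], false, 0, 0⟩ =
            aRun (r.dropWhile pvValidChar)
              ⟨acc, c :: r.takeWhile pvValidChar, false, 0, 0⟩ := by
          rw [hsplit, aRun_word _ hws_all]
          simp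
        have hbB : bLoop (f + 1) (c :: r) =
            (bLoop f (r.dropWhile pvValidChar)).map ((c :: r.takeWhile pvValidChar) :: ·) := by
          simp only [bLoop]
          rw [if_neg hbrace, hcw, if_pos hc]
        have hokr : pvScanOk (r.dropWhile pvValidChar) 0 = true :=
          scanOk_letters _ hws_all _ (by rw [← hsplit]; exact hok)
        have hlen2 : (r.dropWhile pvValidChar).length < f := by
          have := List.length_dropWhile_le (p := pvValidChar) r
          simp at hlen; omega
        have hdropa : pvDropA (c :: r.takeWhile pvValidChar) = c :: r.takeWhile pvValidChar := by
          simp [pvDropA, (validChar_ne c hc).1]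
        cases hr2 : r.dropWhile pvValidChar with
        | nil =>
          rw [hr2] at hword
          rw [hword, hbB, hr2, bLoop_nil f (by rw [hr2] at hlen2; omega)]
          simp [aRun, aFinish, hdropa]
        | cons x r2 =>
          rw [hr2] at hword hokr hlen2 hbB
          have hx : pvValidChar x = false := dropWhile_head_false pvValidChar r x r2 hr2
          have hxbrace : x = '{' := by
            by_contra hxx
            have hxr : x ≠ '}' := by
              rintro rfl
              simp [pvScanOk] at hokr
            simp [pvScanOk, pvLetter_eq, hxx, hxr, hx] at hokr
          subst hxbrace
          have hstep1 : aStep '{' (⟨acc, c :: r.takeWhile pvValidChar, false, 0, 0⟩ : ASt) =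
              some ⟨acc ++ [c :: r.takeWhile pvValidChar], ['{'], true, 1, 0⟩ := by
            simp [aStep]
          have hstep2 : aStep '{' (⟨acc ++ [c :: r.takeWhile pvValidChar], [], false, 0, 0⟩ : ASt) =
              some ⟨acc ++ [c :: r.takeWhile pvValidChar], ['{'], true, 1, 0⟩ := by
            simp [aStep]
          have hsame : aRun ('{' :: r2) ⟨acc, c :: r.takeWhile pvValidChar, false, 0, 0⟩ =
              aRun ('{' :: r2) ⟨acc ++ [c :: r.takeWhile pvValidChar], [], false, 0, 0⟩ := by
            simp [aRun, hstep1, hstep2]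
          rw [hword, hsame,
            ih ('{' :: r2) hlen2 hokr (acc ++ [c :: r.takeWhile pvValidChar]), hbB]
          cases bLoop f ('{' :: r2) <;> simp [hdropa]

-- B returns on every valid input
theorem bLoop_some : ∀ (fuel : Nat) (cs : List Char), cs.length < fuel →
    pvScanOk cs 0 = true → ∃ lb, bLoop fuel cs = some lb := by
  intro fuel
  induction fuel with
  | zero => intro cs h; omega
  | succ f ih =>
    intro cs hlen hok
    match cs with
    | [] => exact ⟨[], rfl⟩
    | c :: r =>
      by_cases hbrace : c = '{'
      · subst hbrace
        have hok' : pvScanOk r 1 = true := by simpa [pvScanOk] using hok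
        obtain ⟨body, rest', hr, hbne, hok0, _, hbj, _⟩ := jseg r 1 (by omega) hok'
        have hlen' : rest'.length < f := by
          have h1 : r.length = body.length + rest'.length := by rw [hr]; simp
          have h2 : 1 ≤ body.length := by
            cases body with
            | nil => exact absurd rfl hbne
            | cons _ _ => simp
          simp at hlen; omega
        obtain ⟨lb, hlb⟩ := ih rest' hlen' hok0
        exact ⟨('{' :: body) :: lb, by simp [bLoop, hbj ['{'], hlb]⟩
      · have hnotr : c ≠ '}' := by
          rintro rfl; simp [pvScanOk] at hok
        have hc : pvValidChar c = true := by
          by_contra hcc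
          simp [pvScanOk, pvLetter_eq, hbrace, hnotr, hcc] at hok
        have hcw : bIsWordChar = pvValidChar := rfl
        have hsplit : c :: r = (c :: r.takeWhile pvValidChar) ++ r.dropWhile pvValidChar := by
          simp [List.takeWhile_append_dropWhile]
        have hws_all : ∀ d ∈ c :: r.takeWhile pvValidChar, pvValidChar d = true := by
          intro d hd
          rw [List.mem_cons] at hd
          rcases hd with rfl | hd
          · exact hc
          · exact List.mem_takeWhile_imp hd
        have hokr : pvScanOk (r.dropWhile pvValidChar) 0 = true :=
          scanOk_letters _ hws_all _ (by rw [← hsplit]; exact hok)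
        have hlen2 : (r.dropWhile pvValidChar).length < f := by
          have := List.length_dropWhile_le (p := pvValidChar) r
          simp at hlen; omega
        obtain ⟨lb, hlb⟩ := ih _ hlen2 hokr
        refine ⟨(c :: r.takeWhile pvValidChar) :: lb, ?_⟩
        simp only [bLoop]
        rw [if_neg hbrace, hcw, if_pos hc, hlb]
        rfl

-- on a valid nested input, dropping the inner '{' changes B's token list
theorem bNested_ne : ∀ (fuel : Nat) (cs : List Char), cs.length < fuel →
    pvScanOk cs 0 = true → pvNested cs 0 = true →
    ∀ lb, bLoop fuel cs = some lb → lb.map pvDropA ≠ lb := by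
  intro fuel
  induction fuel with
  | zero => intro cs h; omega
  | succ f ih =>
    intro cs hlen hok hnst lb hlb
    match cs with
    | [] => simp [pvNested] at hnst
    | c :: r =>
      by_cases hbrace : c = '{'
      · subst hbrace
        have hok' : pvScanOk r 1 = true := by simpa [pvScanOk] using hok
        obtain ⟨body, rest', hr, hbne, hok0, hnsteq, hbj, _⟩ := jseg r 1 (by omega) hok'
        have hlen' : rest'.length < f := by
          have h1 : r.length = body.length + rest'.length := by rw [hr]; simp
          have h2 : 1 ≤ body.length := by
            cases body with
            | nil => exact absurd rfl hbne
            | cons _ _ => simp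
          simp at hlen; omega
        have hnst' : (body.contains '{' || pvNested rest' 0) = true := by
          rw [← hnsteq]
          simpa [pvNested] using hnst
        rw [show bLoop (f + 1) ('{' :: r) = (bLoop f rest').map (('{' :: body) :: ·) by
          simp [bLoop, hbj ['{']]] at hlb
        obtain ⟨lb', hbl', hlbeq⟩ : ∃ lb', bLoop f rest' = some lb' ∧
            lb = ('{' :: body) :: lb' := by
          cases hbl : bLoop f rest' with
          | none => rw [hbl] at hlb; simp at hlb
          | some lb' =>
            rw [hbl] at hlb
            simp at hlb
            exact ⟨lb', rfl, hlb.symm⟩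
        subst hlbeq
        rcases (Bool.or_eq_true _ _).mp hnst' with hbody | hrest
        · intro heq
          simp only [List.map_cons] at heq
          have hhead : pvDropA ('{' :: body) = '{' :: body := (List.cons.inj heq).1
          simp only [pvDropA] at hhead
          have hbody' : List.filter (fun x => x != '{') body = body := (List.cons.inj hhead).2
          have hmem : '{' ∈ body := by rw [List.contains_iff_mem] at hbody; exact hbody
          have hlt : (body.filter (· != '{')).length < body.length :=
            List.length_filter_lt_length_iff_exists.mpr ⟨'{', hmem, by simp⟩
          rw [hbody'] at hlt
          exact lt_irrefl _ hlt
        · intro heq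
          simp only [List.map_cons] at heq
          exact ih rest' hlen' hok0 hrest lb' hbl' (List.cons.inj heq).2
      · have hnotr : c ≠ '}' := by
          rintro rfl; simp [pvScanOk] at hok
        have hc : pvValidChar c = true := by
          by_contra hcc
          simp [pvScanOk, pvLetter_eq, hbrace, hnotr, hcc] at hok
        have hcw : bIsWordChar = pvValidChar := rfl
        have hsplit : c :: r = (c :: r.takeWhile pvValidChar) ++ r.dropWhile pvValidChar := by
          simp [List.takeWhile_append_dropWhile]
        have hws_all : ∀ d ∈ c :: r.takeWhile pvValidChar, pvValidChar d = true := by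
          intro d hd
          rw [List.mem_cons] at hd
          rcases hd with rfl | hd
          · exact hc
          · exact List.mem_takeWhile_imp hd
        have hokr : pvScanOk (r.dropWhile pvValidChar) 0 = true :=
          scanOk_letters _ hws_all _ (by rw [← hsplit]; exact hok)
        have hnstr : pvNested (r.dropWhile pvValidChar) 0 = true := by
          rw [← nested_letters _ hws_all (r.dropWhile pvValidChar), ← hsplit]
          exact hnst
        have hlen2 : (r.dropWhile pvValidChar).length < f := by
          have := List.length_dropWhile_le (p := pvValidChar) r
          simp at hlen; omega
        rw [show bLoop (f + 1) (c :: r) =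
            (bLoop f (r.dropWhile pvValidChar)).map ((c :: r.takeWhile pvValidChar) :: ·) by
          simp only [bLoop]
          rw [if_neg hbrace, hcw, if_pos hc]] at hlb
        obtain ⟨lb', hbl', hlbeq⟩ : ∃ lb', bLoop f (r.dropWhile pvValidChar) = some lb' ∧
            lb = (c :: r.takeWhile pvValidChar) :: lb' := by
          cases hbl : bLoop f (r.dropWhile pvValidChar) with
          | none => rw [hbl] at hlb; simp at hlb
          | some lb' =>
            rw [hbl] at hlb
            simp at hlb
            exact ⟨lb', rfl, hlb.symm⟩
        subst hlbeq
        intro heq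
        simp only [List.map_cons] at heq
        exact ih _ hlen2 hokr hnstr lb' hbl' (List.cons.inj heq).2

theorem ofList_injective : Function.Injective String.ofList := by
  intro a b h
  have := congrArg String.toList h
  simpa using this

-- ===== VERDICT (by name: the statement is the Claim_ definition above) =====
theorem godly_parser_spec : Claim_unchanged_godly_parser := by
  intro cmd _ hpre hnd
  show godly_parser cmd = godly_parser_alt cmd
  unfold godly_parser godly_parser_alt
  rw [special_eq]
  cases hs : aSpecial? cmd.toList with
  | some r => rfl
  | none =>
    have hsc : pvSpecialCase cmd.toList = false := by
      by_contra hx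
      rw [Bool.not_eq_false] at hx
      exact special_some cmd.toList hx hs
    have hok : pvScanOk cmd.toList 0 = true := by
      cases hpre with
      | inl h => rw [h] at hsc; exact Bool.noConfusion hsc
      | inr h => exact h
    have hne : pvNested cmd.toList 0 = false := by
      by_contra hx
      rw [Bool.not_eq_false] at hx
      exact hnd ⟨hsc, hok, hx⟩
    have hmain := main_eq (cmd.toList.length + 1) cmd.toList (by omega) hok hne []
    simp only [List.nil_append] at hmain
    rw [show Option.map (fun l => l) (bLoop (cmd.toList.length + 1) cmd.toList) =
        bLoop (cmd.toList.length + 1) cmd.toList from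
      by cases bLoop (cmd.toList.length + 1) cmd.toList <;> rfl] at hmain
    rw [hmain]

theorem godly_parser_changed : Claim_changed_godly_parser := by
  unfold Claim_changed_godly_parser; decide

theorem godly_parser_tight : Claim_exact_godly_parser := by
  intro cmd _ hpre hd
  obtain ⟨hsc, hok, hnst⟩ := hd
  have hsA : aSpecial? cmd.toList = none := special_none _ hsc
  unfold godly_parser godly_parser_alt
  rw [special_eq, hsA]
  obtain ⟨lb, hlb⟩ := bLoop_some (cmd.toList.length + 1) cmd.toList (by omega) hok
  have hA := main_gen (cmd.toList.length + 1) cmd.toList (by omega) hok []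
  rw [hlb] at hA
  simp only [Option.map_some, List.nil_append] at hA
  rw [hA, hlb]
  intro heq
  have hinj : (lb.map pvDropA) = lb :=
    List.map_injective_iff.mpr ofList_injective heq
  exact bNested_ne (cmd.toList.length + 1) cmd.toList (by omega) hok hnst lb hlb hinj
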